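-- pv_equiv track=rewrite | github.com/cognettings/vulscanner | skims/skims/lib/root/f035/c_sharp.py | check_no_password_argument
-- ===== SOURCE A (Python) =====
-- def check_no_password_argument(triggers: set[str]) -> bool:
--     eval_str = "".join(list(triggers))
--     for arg_part in eval_str.split(";"):
--         if "=" in arg_part:
--             var, value = arg_part.split("=", maxsplit=1)
--             if var == "Password" and not value:
--                 return True
--     return False
-- ===== SOURCE B (Python) =====
-- def check_no_password_argument(triggers: set[str]) -> bool:
--     eval_str = "".join(list(triggers))
--     return ";Password=;" in ";" + eval_str + ";"
-- ===== Notes on version B (the rewrite author's own statement) =====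
-- stated objective: simpler
-- what changed: Replaces the split-on-';' loop with per-segment split-on-'=' parsing by a single substring test: a segment equal to 'Password=' exists iff ';Password=;' occurs in the ';'-padded joined string.
import Mathlib
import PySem

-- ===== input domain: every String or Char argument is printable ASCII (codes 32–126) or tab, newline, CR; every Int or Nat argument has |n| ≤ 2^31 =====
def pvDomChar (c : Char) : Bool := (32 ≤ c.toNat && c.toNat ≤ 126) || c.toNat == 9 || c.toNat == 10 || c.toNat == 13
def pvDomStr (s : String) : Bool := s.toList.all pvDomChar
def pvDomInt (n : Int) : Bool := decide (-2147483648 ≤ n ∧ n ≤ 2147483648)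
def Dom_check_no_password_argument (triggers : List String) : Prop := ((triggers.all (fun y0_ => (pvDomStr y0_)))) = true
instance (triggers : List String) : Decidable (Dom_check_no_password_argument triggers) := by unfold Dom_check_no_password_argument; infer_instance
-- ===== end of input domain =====

-- B replaces A's split-on-';' / split-on-'=' parsing loop by a single substring test on the ';'-padded joined string (simpler; same return value).

-- ===== PORT A =====
-- the loop 'for arg_part in eval_str.split(";"): …' with its early return.
-- 'var, value = arg_part.split("=", maxsplit=1)' always yields exactly two pieces when "=" is in
-- arg_part; the catch-all match arm is only a totality guard and is unreachable.
def pvLoopA : List (List Char) → Bool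
  | [] => false
  | part :: rest =>
    if PySem.Chars.isIn ['='] part then
      match PySem.Chars.splitOnMax part ['='] 1 with
      | [var, value] => if var = "Password".toList ∧ value = [] then true else pvLoopA rest
      | _ => pvLoopA rest
    else pvLoopA rest

def check_no_password_argument (triggers : List String) : Bool :=
  let eval_str := PySem.Str.join "" triggers
  pvLoopA (PySem.Chars.splitOn eval_str.toList [';'])

-- ===== PORT B =====
-- ';Password=;' in ';' + eval_str + ';'  (string concatenation rendered on the char list)
def check_no_password_argument_alt (triggers : List String) : Bool :=
  let eval_str := PySem.Str.join "" triggers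
  PySem.Chars.isIn ";Password=;".toList (';' :: eval_str.toList ++ [';'])

-- ===== PRECONDITION & SPEC =====
def Spec_check_no_password_argument (triggers : List String) (out : Bool) : Prop := out = check_no_password_argument_alt triggers
instance (triggers : List String) (out : Bool) : Decidable (Spec_check_no_password_argument triggers out) := by unfold Spec_check_no_password_argument; infer_instance

-- ===== CLAIM (what is proved, stated in full; the proofs are below) =====
def Claim_equal_check_no_password_argument : Prop := ∀ (triggers : List String), Dom_check_no_password_argument triggers → Spec_check_no_password_argument triggers (check_no_password_argument triggers)

-- ===== LEMMAS AND PROOFS =====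

theorem pv_go_eq (c : Char) : ∀ (fuel : Nat) (l cur : List Char) (acc : List (List Char)), l.length ≤ fuel →
    PySem.Chars.splitOn.go [c] fuel l cur acc
      = acc.reverse ++ (l.splitOn c).modifyHead (cur.reverse ++ ·) := by
  intro fuel
  induction fuel with
  | zero =>
    intro l cur acc h
    have hl : l = [] := List.eq_nil_of_length_eq_zero (Nat.le_zero.mp h)
    subst hl
    rw [PySem.Chars.splitOn.go.eq_def]
    simp [List.splitOn_nil]
  | succ n ih =>
    intro l cur acc h
    cases l with
    | nil =>
      rw [PySem.Chars.splitOn.go.eq_def]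
      simp [List.splitOn_nil]
    | cons x rest =>
      rw [PySem.Chars.splitOn.go.eq_def]
      simp only []
      by_cases hx : x = c
      · subst hx
        have hpre : List.isPrefixOf [x] (x :: rest) = true := by
          simp [List.isPrefixOf]
        rw [if_pos hpre]
        have hdrop : List.drop [x].length (x :: rest) = rest := by simp
        rw [hdrop, ih rest [] _ (by simpa using Nat.le_of_succ_le_succ h)]
        simp [List.splitOn, List.splitOnP_cons]
        cases (List.splitOnP (fun y => y == x) rest) <;> rfl
      · have hpre : List.isPrefixOf [c] (x :: rest) = false := by
          simp [List.isPrefixOf]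
          exact fun hh => (hx hh.symm).elim
        rw [if_neg (by simp [hpre]), ih rest (x :: cur) _ (by simpa using Nat.le_of_succ_le_succ h)]
        have hsp : List.splitOn c (x :: rest) = (List.splitOnP (fun y => y == c) rest).modifyHead (x :: ·) := by
          rw [List.splitOn, List.splitOnP_cons]
          simp [hx]
        rw [hsp, List.modifyHead_modifyHead]
        simp [List.splitOn, Function.comp_def]

theorem pv_splitOn_eq (c : Char) (s : List Char) :
    PySem.Chars.splitOn s [c] = s.splitOn c := by
  rw [PySem.Chars.splitOn, pv_go_eq c (s.length + 1) s [] [] (Nat.le_succ _)]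
  simp
  cases s.splitOn c <;> rfl

theorem pv_goM0 (c : Char) : ∀ (fuel : Nat) (l cur : List Char) (acc : List (List Char)),
    PySem.Chars.splitOnMax.go [c] fuel 0 l cur acc = ((cur.reverse ++ l) :: acc).reverse := by
  intro fuel
  cases fuel with
  | zero => intro l cur acc; rw [PySem.Chars.splitOnMax.go.eq_def]
  | succ n =>
    intro l cur acc
    cases l with
    | nil => rw [PySem.Chars.splitOnMax.go.eq_def]; simp
    | cons x rest => rw [PySem.Chars.splitOnMax.go.eq_def]; simp

theorem pv_goM1 (c : Char) : ∀ (fuel : Nat) (l cur : List Char) (acc : List (List Char)), l.length ≤ fuel →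
    PySem.Chars.splitOnMax.go [c] fuel 1 l cur acc
      = if c ∈ l then acc.reverse ++ [cur.reverse ++ l.takeWhile (· != c), (l.dropWhile (· != c)).tail]
        else acc.reverse ++ [cur.reverse ++ l] := by
  intro fuel
  induction fuel with
  | zero =>
    intro l cur acc h
    have hl : l = [] := List.eq_nil_of_length_eq_zero (Nat.le_zero.mp h)
    subst hl
    rw [PySem.Chars.splitOnMax.go.eq_def]
    simp
  | succ n ih =>
    intro l cur acc h
    cases l with
    | nil => rw [PySem.Chars.splitOnMax.go.eq_def]; simp
    | cons x rest =>
      rw [PySem.Chars.splitOnMax.go.eq_def]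
      simp only []
      by_cases hx : x = c
      · subst hx
        have hpre : List.isPrefixOf [x] (x :: rest) = true := by simp [List.isPrefixOf]
        rw [if_neg (by omega), if_pos hpre]
        have hdrop : List.drop [x].length (x :: rest) = rest := by simp
        rw [hdrop]
        show PySem.Chars.splitOnMax.go [x] n 0 rest [] (cur.reverse :: acc) = _
        rw [pv_goM0]
        simp [List.takeWhile, List.dropWhile]
      · have hpre : List.isPrefixOf [c] (x :: rest) = false := by
          simp [List.isPrefixOf]
          exact fun hh => (hx hh.symm).elim
        rw [if_neg (by omega), if_neg (by simp [hpre]), ih rest (x :: cur) _ (by simpa using Nat.le_of_succ_le_succ h)]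
        by_cases hm : c ∈ rest
        · rw [if_pos hm, if_pos (by simp [hm])]
          have hbe : (x != c) = true := by simp [hx]
          simp [List.takeWhile, List.dropWhile, hbe]
        · rw [if_neg hm, if_neg (by simp [hm, Ne.symm hx, hx])]
          simp

theorem pv_splitOnMax_eq (c : Char) (part : List Char) :
    PySem.Chars.splitOnMax part [c] 1
      = if c ∈ part then [part.takeWhile (· != c), (part.dropWhile (· != c)).tail] else [part] := by
  rw [PySem.Chars.splitOnMax]
  rw [if_neg (by omega)]
  show PySem.Chars.splitOnMax.go [c] (part.length + 1) 1 part [] [] = _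
  rw [pv_goM1 c (part.length + 1) part [] [] (by simpa using Nat.le_succ _)]
  split <;> simp

theorem pv_loopA_cons (part : List Char) (rest : List (List Char)) :
    pvLoopA (part :: rest) = if part = "Password=".toList then true else pvLoopA rest := by
  rw [pvLoopA]
  by_cases hin : PySem.Chars.isIn ['='] part = true
  · rw [if_pos hin]
    have hmem : '=' ∈ part := (List.singleton_infix_iff _ _).mp ((PySem.Chars.isIn_iff_infix _ _).mp hin)
    rw [pv_splitOnMax_eq, if_pos hmem]
    simp only []
    by_cases hc : part.takeWhile (· != '=') = "Password".toList ∧ (part.dropWhile (· != '=')).tail = []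
    · rw [if_pos hc]
      have hpart : part = "Password=".toList := by
        have hd : part.dropWhile (· != '=') ≠ [] := by
          intro hnil
          have hsplit := List.takeWhile_append_dropWhile (p := (· != '=')) (l := part)
          rw [hnil, List.append_nil] at hsplit
          have hall : '=' ∈ part.takeWhile (· != '=') := by rw [hsplit]; exact hmem
          have := List.mem_takeWhile_imp hall
          simp at this
        obtain ⟨d, dt, hdd⟩ := List.exists_cons_of_ne_nil hd
        have hfalse : (fun x => x != '=') ((part.dropWhile (· != '=')).head hd) = false :=
          List.head_dropWhile_not _ hd
        simp only [hdd, List.head_cons] at hfalse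
        have hdeq : d = '=' := by simpa using hfalse
        have htail : dt = [] := by
          have h2 := hc.2
          rw [hdd] at h2
          simpa using h2
        have hfin : part = "Password".toList ++ ['='] := by
          conv_lhs => rw [← List.takeWhile_append_dropWhile (p := (· != '=')) (l := part)]
          rw [hc.1, hdd, hdeq, htail]
        rw [hfin]; decide
      rw [if_pos hpart]
    · rw [if_neg hc]
      by_cases hp : part = "Password=".toList
      · exfalso; apply hc; subst hp; constructor <;> decide
      · rw [if_neg hp]
  · rw [if_neg hin]
    have hnmem : '=' ∉ part := by
      intro hmem
      exact hin ((PySem.Chars.isIn_iff_infix _ _).mpr ((List.singleton_infix_iff _ _).mpr hmem))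
    have hp : part ≠ "Password=".toList := by
      intro hp; subst hp; exact hnmem (by decide)
    rw [if_neg hp]

theorem pv_loopA_eq (parts : List (List Char)) :
    pvLoopA parts = decide ("Password=".toList ∈ parts) := by
  induction parts with
  | nil => rfl
  | cons part rest ih =>
    rw [pv_loopA_cons, ih]
    by_cases hp : part = "Password=".toList
    · subst hp; simp
    · rw [if_neg hp]
      have h1 : ("Password=".toList ∈ part :: rest) ↔ ("Password=".toList ∈ rest) := by
        simp only [List.mem_cons]
        constructor
        · rintro (h | h)
          · exact absurd h.symm hp
          · exact h
        · exact Or.inr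
      exact (decide_eq_decide.mpr h1).symm

set_option maxRecDepth 4096 in
theorem pv_mem_of_prefix (s v : List Char) (h : s ++ [';'] = "Password=".toList ++ [';'] ++ v) :
    "Password=".toList ∈ s.splitOn ';' := by
  rcases v.eq_nil_or_concat with hv | ⟨v', b, hv⟩
  · subst hv
    rw [List.append_nil] at h
    have hs : s = "Password=".toList := (List.append_inj' h rfl).1
    rw [hs]
    decide
  · subst hv
    have h2 : s ++ [';'] = ("Password=".toList ++ ';' :: v') ++ [b] := by
      simpa [List.concat_eq_append, List.append_assoc] using h
    obtain ⟨hs, hb⟩ := List.append_inj' h2 rfl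
    rw [hs]
    have hfree : ∀ x ∈ "Password=".toList, ¬((fun c => c == ';') x = true) := by
      intro x hx
      simp only [show "Password=".toList = ['P','a','s','s','w','o','r','d','='] from rfl] at hx
      fin_cases hx <;> simp
    have key := List.splitOnP_first (p := fun c => c == ';') (xs := "Password=".toList) hfree ';' rfl v'
    rw [List.splitOn, key]
    exact List.mem_cons_self

theorem pv_mem_tail_of_inner (s : List Char) : ∀ (u v : List Char),
    s ++ [';'] = u ++ (';' :: ("Password=".toList ++ (';' :: v))) →
    "Password=".toList ∈ (s.splitOn ';').tail := by
  induction s with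
  | nil =>
    intro u v h
    have := congrArg List.length h
    simp at this
    omega
  | cons a s' ih =>
    intro u v h
    cases u with
    | nil =>
      simp only [List.nil_append, List.cons_append] at h
      obtain ⟨ha, hs⟩ := List.cons.inj h  -- guess; fix if needed
      subst ha
      have hmem : "Password=".toList ∈ s'.splitOn ';' := by
        apply pv_mem_of_prefix s' v
        simp [List.append_assoc] at hs; exact hs
      rw [List.splitOn, List.splitOnP_cons]
      simp only [beq_self_eq_true, if_true]
      simpa [List.splitOn] using hmem
    | cons b u' =>
      simp only [List.cons_append] at h
      obtain ⟨hab, hs⟩ := List.cons.inj h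
      have htail : "Password=".toList ∈ (s'.splitOn ';').tail := ih u' v hs
      by_cases ha : a = ';'
      · subst ha
        rw [List.splitOn, List.splitOnP_cons]
        simp only [beq_self_eq_true, if_true]
        exact List.mem_of_mem_tail (by simpa [List.splitOn] using htail)
      · rw [List.splitOn, List.splitOnP_cons]
        simp only [beq_iff_eq, ha, if_false]
        have : ∀ (l : List (List Char)) (f : List Char → List Char), (l.modifyHead f).tail = l.tail := by
          intro l f; cases l <;> rfl
        rw [this]
        simpa [List.splitOn] using htail

theorem pv_infix_of_mem : ∀ (l1 l2 : List (List Char)),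
    (';' :: ("Password=".toList ++ [';']))
      <:+: ';' :: PySem.Chars.join [';'] (l1 ++ "Password=".toList :: l2) ++ [';'] := by
  intro l1
  induction l1 with
  | nil =>
    intro l2
    cases l2 with
    | nil =>
      rw [List.nil_append, PySem.Chars.join_singleton]
      exact List.infix_refl _
    | cons b l2' =>
      rw [List.nil_append, PySem.Chars.join_cons_cons]
      refine ⟨[], PySem.Chars.join [';'] (b :: l2') ++ [';'], ?_⟩
      simp
  | cons a l1' ih =>
    intro l2
    have hne : l1' ++ "Password=".toList :: l2 ≠ [] := by simp
    obtain ⟨c, cs, hcc⟩ := List.exists_cons_of_ne_nil hne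
    have hjoin : PySem.Chars.join [';'] ((a :: l1') ++ "Password=".toList :: l2)
        = a ++ [';'] ++ PySem.Chars.join [';'] (l1' ++ "Password=".toList :: l2) := by
      rw [List.cons_append, hcc, PySem.Chars.join_cons_cons, ← hcc]
    rw [hjoin]
    have hsplit : ';' :: (a ++ [';'] ++ PySem.Chars.join [';'] (l1' ++ "Password=".toList :: l2)) ++ [';']
        = (';' :: a) ++ (';' :: PySem.Chars.join [';'] (l1' ++ "Password=".toList :: l2) ++ [';']) := by
      simp
    rw [hsplit]
    exact (ih l2).trans (List.suffix_append _ _).isInfix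

theorem pv_main (s : List Char) :
    "Password=".toList ∈ s.splitOn ';'
      ↔ (';' :: ("Password=".toList ++ [';'])) <:+: (';' :: s ++ [';']) := by
  constructor
  · intro hmem
    obtain ⟨l1, l2, hsplit⟩ := List.append_of_mem hmem
    have hs : s = PySem.Chars.join [';'] (l1 ++ "Password=".toList :: l2) := by
      rw [PySem.Chars.join, ← hsplit]
      exact (List.intercalate_splitOn (xs := s) ';').symm
    rw [hs]
    exact pv_infix_of_mem l1 l2
  · rintro ⟨u, v, huv⟩
    cases u with
    | nil =>
      simp only [List.nil_append, List.cons_append, List.append_assoc] at huv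
      obtain ⟨-, hs⟩ := List.cons.inj huv
      exact pv_mem_of_prefix s v (by simpa [List.append_assoc] using hs.symm)
    | cons x u' =>
      simp only [List.cons_append, List.append_assoc] at huv
      obtain ⟨hx, hs⟩ := List.cons.inj huv
      exact List.mem_of_mem_tail (pv_mem_tail_of_inner s u' v (by simpa [List.append_assoc] using hs.symm))

-- both ports, on the joined character list: A's parse loop equals B's padded substring test
theorem pv_bool (s : List Char) :
    pvLoopA (PySem.Chars.splitOn s [';']) = PySem.Chars.isIn ";Password=;".toList (';' :: s ++ [';']) := by
  rw [pv_splitOn_eq, pv_loopA_eq]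
  have hpad : ";Password=;".toList = ';' :: ("Password=".toList ++ [';']) := rfl
  rw [Bool.eq_iff_iff, decide_eq_true_eq, hpad, PySem.Chars.isIn_iff_infix]
  exact pv_main s

-- ===== VERDICT (by name: the statement is the Claim_ definition above) =====
theorem check_no_password_argument_spec : Claim_equal_check_no_password_argument := by
  intro triggers _
  unfold Spec_check_no_password_argument check_no_password_argument check_no_password_argument_alt
  exact pv_bool _
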